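-- pv_equiv track=rewrite | github.com/LewisStaples/advent_of_code_2019 | day24/day24.py | get_first_repeat
-- ===== SOURCE A (Python) =====
-- def get_biodiversity_rating(state):
--     ret_val = 0
--     tile_value = 1
--     for y_val in range(len(state[0])):
--         for x_val in range(len(state)):
--             if state[y_val][x_val] == "#":
--                 ret_val += tile_value
--             tile_value *= 2
--     return ret_val
--
-- def get_posn_value(state, i_row, i_position):
--     if i_row < 0 or i_position < 0:
--         return 0
--     try:
--         if state[i_row][i_position] == "#":
--             return 1
--     except IndexError:
--         pass  # It will follow below logic
--
--     return 0
--
-- def get_count_adj_bugs(state, i_row, i_position):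
--     ret_val = 0
--     for diff in [1, -1]:
--         ret_val += get_posn_value(state, i_row + diff, i_position)
--         ret_val += get_posn_value(state, i_row, i_position + diff)
--
--     return ret_val
--
-- def new_position(state, i_row, i_position):
--     count_adj_bugs = get_count_adj_bugs(state, i_row, i_position)
--     if state[i_row][i_position] == "#" and count_adj_bugs != 1:
--         return "."
--     if state[i_row][i_position] == "." and count_adj_bugs in [1, 2]:
--         return "#"
--     return state[i_row][i_position]
--
-- def next_minute(state):
--     new_state = list()
--
--     for i_row, row in enumerate(state):
--         new_state.append(list())
--         for i_position, _ in enumerate(row):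
--             new_state[-1].append(new_position(state, i_row, i_position))
--
--     return new_state
--
-- def get_first_repeat(state):
--     bio_rat_set = {get_biodiversity_rating(state)}
--     while True:
--         state = next_minute(state)
--         new_bio_rat = get_biodiversity_rating(state)
--         if new_bio_rat in bio_rat_set:
--             return new_bio_rat
--         bio_rat_set.add(new_bio_rat)
-- ===== SOURCE B (Python) =====
-- def get_first_repeat(state):
--     # State as integer bitmasks: bit y*n+x of `bugs` iff cell == "#" (this
--     # mask IS the biodiversity rating), of `empt` iff cell == "." (any other
--     # cell is frozen and never becomes a bug).
--     n = len(state)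
--     bugs = 0
--     empt = 0
--     p = 0
--     for y in range(n):
--         row = state[y]
--         for x in range(n):
--             cell = row[x]
--             if cell == "#":
--                 bugs |= 1 << p
--             elif cell == ".":
--                 empt |= 1 << p
--             p += 1
--     seen = {bugs}
--     while True:
--         nb = 0
--         ne = 0
--         for p in range(n * n):
--             x = p % n
--             a = 0
--             if x > 0 and (bugs >> (p - 1)) & 1:
--                 a += 1
--             if x < n - 1 and (bugs >> (p + 1)) & 1:
--                 a += 1
--             if p >= n and (bugs >> (p - n)) & 1:
--                 a += 1
--             if p + n < n * n and (bugs >> (p + n)) & 1: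
--                 a += 1
--             if (bugs >> p) & 1:
--                 if a == 1:
--                     nb |= 1 << p
--                 else:
--                     ne |= 1 << p
--             elif (empt >> p) & 1:
--                 if a in (1, 2):
--                     nb |= 1 << p
--                 else:
--                     ne |= 1 << p
--         bugs, empt = nb, ne
--         if bugs in seen:
--             return bugs
--         seen.add(bugs)
-- ===== Notes on version B (the rewrite author's own statement) =====
-- stated objective: faster
-- what changed: B packs the whole grid into two integer bitmasks (bug mask = biodiversity rating, empty-cell mask) and evolves them with shift/bit operations, instead of rebuilding a list-of-lists grid via per-cell function calls and re-scoring it each minute.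
-- outside the precondition, e.g. on get_first_repeat([['.', '#'], ['.', '.', '#']]): A returns 6, B returns 9
import Mathlib
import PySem

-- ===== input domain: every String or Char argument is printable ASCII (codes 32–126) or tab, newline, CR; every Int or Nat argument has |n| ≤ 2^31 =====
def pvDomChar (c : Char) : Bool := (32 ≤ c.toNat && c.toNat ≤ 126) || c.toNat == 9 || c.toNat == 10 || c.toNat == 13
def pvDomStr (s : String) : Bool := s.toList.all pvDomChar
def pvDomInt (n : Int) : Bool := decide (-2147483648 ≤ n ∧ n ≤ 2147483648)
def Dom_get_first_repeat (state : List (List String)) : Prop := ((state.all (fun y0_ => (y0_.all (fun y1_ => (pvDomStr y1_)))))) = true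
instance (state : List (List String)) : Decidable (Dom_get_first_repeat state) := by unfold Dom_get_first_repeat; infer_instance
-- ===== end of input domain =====

-- B re-implements the simulation on integer bitmasks (bit y*n+x of the bug mask = cell "#",
-- the bug mask IS the biodiversity rating) instead of rebuilding lists of lists each minute.


-- ===== PORT A =====
-- state[r][p] with int indices (some = in range, none = IndexError)
def pvCellA (state : List (List String)) (r p : Int) : Option String :=
  (PySem.List.pyGet? state r).bind (fun row => PySem.List.pyGet? row p)

-- get_biodiversity_rating; state[0] / state[y_val][x_val] ported with headD/getD totality
-- guards: inputs on which the Python indexing raises IndexError are excluded by Pre_.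
def pvBioRating (state : List (List String)) : Int :=
  ((List.range (state.headD []).length).foldl (fun (acc : Int × Int) y =>
    (List.range state.length).foldl (fun (acc : Int × Int) x =>
      ((if (state.getD y []).getD x "" == "#" then acc.1 + acc.2 else acc.1), acc.2 * 2)) acc)
    ((0 : Int), (1 : Int))).1

-- get_posn_value (the try/except IndexError is the none branch of pvCellA)
def pvPosnValue (state : List (List String)) (i_row i_position : Int) : Int :=
  if i_row < 0 ∨ i_position < 0 then 0
  else match pvCellA state i_row i_position with
    | some c => if c == "#" then 1 else 0
    | none => 0

-- get_count_adj_bugs (diff = 1 then diff = -1)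
def pvCountAdj (state : List (List String)) (i_row i_position : Int) : Int :=
  0 + pvPosnValue state (i_row + 1) i_position + pvPosnValue state i_row (i_position + 1)
    + pvPosnValue state (i_row + (-1)) i_position + pvPosnValue state i_row (i_position + (-1))

-- new_position; state[i_row][i_position] is in range at every call site (totality guard "")
def pvNewPosition (state : List (List String)) (i_row i_position : Int) : String :=
  let c := (pvCellA state i_row i_position).getD ""
  let a := pvCountAdj state i_row i_position
  if c == "#" ∧ a ≠ 1 then "."
  else if c == "." ∧ (a = 1 ∨ a = 2) then "#"
  else c

-- next_minute (append loops become the structural maps over enumerate)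
def pvNextMinute (state : List (List String)) : List (List String) :=
  (PySem.List.enumerate state).map (fun yr =>
    (PySem.List.enumerate yr.2).map (fun xc => pvNewPosition state yr.1 xc.1))

-- the while-True loop; fuel is a totality guard only: the ratings of an n×n grid lie in
-- [0, 2^(n*n)) and the seen-set grows by one each non-returning iteration, so the Python
-- loop returns within 2^(n*n) iterations on every input admitted by Pre_.
def pvLoopA : Nat → List (List String) → PySem.Set Int → Int
  | 0, _, _ => 0
  | fuel+1, state, seen =>
    let s' := pvNextMinute state
    let r := pvBioRating s'
    if PySem.Set.contains seen r then r else pvLoopA fuel s' (PySem.Set.add seen r)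

def get_first_repeat (state : List (List String)) : Int :=
  pvLoopA (2 ^ (state.length * state.length) + 1) state
    (PySem.Set.ofList [pvBioRating state])

-- ===== PORT B =====
-- (bugs, empt, p): bug mask, empty-cell mask, running bit position; state[y] / row[x]
-- ported with getD totality guards (Source B raises IndexError there, outside Pre_)
def pvEncode (state : List (List String)) : Nat × Nat × Nat :=
  (List.range state.length).foldl (fun acc y =>
    let row := state.getD y []
    (List.range state.length).foldl (fun (acc : Nat × Nat × Nat) x =>
      let cell := row.getD x ""
      if cell == "#" then (acc.1 ||| (1 <<< acc.2.2), acc.2.1, acc.2.2 + 1)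
      else if cell == "." then (acc.1, acc.2.1 ||| (1 <<< acc.2.2), acc.2.2 + 1)
      else (acc.1, acc.2.1, acc.2.2 + 1)) acc) (0, 0, 0)

-- the four neighbour tests of Source B ((bugs >> k) & 1 is testBit)
def pvAdj (n bugs p : Nat) : Nat :=
  (if 0 < p % n ∧ bugs.testBit (p - 1) then 1 else 0)
  + (if p % n < n - 1 ∧ bugs.testBit (p + 1) then 1 else 0)
  + (if n ≤ p ∧ bugs.testBit (p - n) then 1 else 0)
  + (if p + n < n * n ∧ bugs.testBit (p + n) then 1 else 0)

-- one minute on the masks: the for-p loop building (nb, ne)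
def pvStep (n bugs empt : Nat) : Nat × Nat :=
  (List.range (n * n)).foldl (fun (acc : Nat × Nat) p =>
    if bugs.testBit p then
      (if pvAdj n bugs p = 1 then (acc.1 ||| (1 <<< p), acc.2)
       else (acc.1, acc.2 ||| (1 <<< p)))
    else if empt.testBit p then
      (if pvAdj n bugs p = 1 ∨ pvAdj n bugs p = 2 then (acc.1 ||| (1 <<< p), acc.2)
       else (acc.1, acc.2 ||| (1 <<< p)))
    else acc) (0, 0)

-- the while-True loop of Source B; same totality-guard fuel as the port of A
def pvLoopB (n : Nat) : Nat → Nat → Nat → PySem.Set Int → Int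
  | 0, _, _, _ => 0
  | fuel+1, bugs, empt, seen =>
    let s := pvStep n bugs empt
    if PySem.Set.contains seen (s.1 : Int) then (s.1 : Int)
    else pvLoopB n fuel s.1 s.2 (PySem.Set.add seen (s.1 : Int))

def get_first_repeat_alt (state : List (List String)) : Int :=
  let n := state.length
  let enc := pvEncode state
  pvLoopB n (2 ^ (n * n) + 1) enc.1 enc.2.1 (PySem.Set.ofList [(enc.1 : Int)])

-- ===== PRECONDITION & SPEC =====
-- Pre_ excludes the inputs on which A raises IndexError (empty or most non-square grids) and
-- the remaining ragged grids (rows longer than the row count): there A still returns, but its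
-- biodiversity rating and neighbour rule mix two incompatible geometries, an accident of its
-- asymmetric width/height loops; B uses the square row-major geometry.
def Pre_get_first_repeat (state : List (List String)) : Prop :=
  state ≠ [] ∧ ∀ row ∈ state, row.length = state.length
instance (state : List (List String)) : Decidable (Pre_get_first_repeat state) := by
  unfold Pre_get_first_repeat; infer_instance

def pvWitness_get_first_repeat : List (List String) := [["#", "."], [".", "."]]

def Spec_get_first_repeat (state : List (List String)) (out : Int) : Prop :=
  out = get_first_repeat_alt state
instance (state : List (List String)) (out : Int) : Decidable (Spec_get_first_repeat state out) := by
  unfold Spec_get_first_repeat; infer_instance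

-- ===== CLAIM (what is proved, stated in full; the proofs are below) =====
def Claim_equal_get_first_repeat : Prop := ∀ (state : List (List String)),
  Dom_get_first_repeat state → Pre_get_first_repeat state →
    Spec_get_first_repeat state (get_first_repeat state)

-- ===== LEMMAS AND PROOFS =====

-- number whose binary digits are the cells of l equal to t (bit q ↔ l[q] == t)
def pvVal (t : String) (l : List String) : Nat :=
  l.foldr (fun c acc => (if c == t then 1 else 0) + 2 * acc) 0

theorem pvVal_testBit (t : String) : ∀ (l : List String) (q : Nat),
    (pvVal t l).testBit q = (decide (q < l.length) && (l.getD q "" == t)) := by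
  intro l
  induction l with
  | nil => intro q; simp [pvVal]
  | cons c l ih =>
    intro q
    cases q with
    | zero =>
      by_cases hc : c = t
      · simp [pvVal, Nat.testBit_zero, hc, Nat.add_mul_mod_self_left]
      · simp [pvVal, Nat.testBit_zero, hc, Nat.add_mul_mod_self_left]
    | succ q =>
      have hdiv : ((if c == t then 1 else 0) + 2 * pvVal t l) / 2 = pvVal t l := by
        by_cases hc : c == t <;> simp [hc] <;> omega
      have := ih q
      simp only [pvVal, List.foldr] at *
      rw [Nat.testBit_succ, hdiv]
      simpa [List.getD] using this
  
theorem pvTestBit_one_shiftLeft (p q : Nat) : (1 <<< p).testBit q = decide (p = q) := by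
  rw [Nat.one_shiftLeft, Nat.testBit_two_pow]

-- named form of pvEncode's cell update (definitionally the lambda in pvEncode)
def pvEncCell (acc : Nat × Nat × Nat) (cell : String) : Nat × Nat × Nat :=
  if cell == "#" then (acc.1 ||| (1 <<< acc.2.2), acc.2.1, acc.2.2 + 1)
  else if cell == "." then (acc.1, acc.2.1 ||| (1 <<< acc.2.2), acc.2.2 + 1)
  else (acc.1, acc.2.1, acc.2.2 + 1)

theorem pvFoldlRangeGetD {α β : Type} (l : List α) (d : α) (g : β → α → β) (a : β) :
    (List.range l.length).foldl (fun acc i => g acc (l.getD i d)) a = l.foldl g a := by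
  have hmap : (List.range l.length).map (fun i => l.getD i d) = l := by
    apply List.ext_getElem
    · simp
    · intro i h1 h2
      simp only [List.getElem_map, List.getElem_range]
      exact List.getD_eq_getElem l d (by simpa using h2)
  conv_rhs => rw [← hmap]
  rw [List.foldl_map]

theorem pvEncode_eq_flat (s : List (List String))
    (hr : ∀ r ∈ s, r.length = s.length) :
    pvEncode s = s.flatten.foldl pvEncCell (0, 0, 0) := by
  unfold pvEncode
  rw [show (fun (acc : Nat × Nat × Nat) (y : Nat) =>
        let row := s.getD y []
        (List.range s.length).foldl (fun (acc : Nat × Nat × Nat) x =>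
          let cell := row.getD x ""
          if cell == "#" then (acc.1 ||| (1 <<< acc.2.2), acc.2.1, acc.2.2 + 1)
          else if cell == "." then (acc.1, acc.2.1 ||| (1 <<< acc.2.2), acc.2.2 + 1)
          else (acc.1, acc.2.1, acc.2.2 + 1)) acc)
      = (fun (acc : Nat × Nat × Nat) (y : Nat) =>
        (List.range s.length).foldl (fun acc x => pvEncCell acc ((s.getD y []).getD x "")) acc)
    from rfl]
  rw [pvFoldlRangeGetD s ([] : List String)
    (fun (acc : Nat × Nat × Nat) row =>
      (List.range s.length).foldl (fun acc x => pvEncCell acc (row.getD x "")) acc)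
    (0, 0, 0)]
  rw [PySem.List.foldl_congr_mem s _
    (fun (acc : Nat × Nat × Nat) row => row.foldl pvEncCell acc) _
    (fun acc row hrow => by
      rw [show s.length = row.length from (hr row hrow).symm]
      exact pvFoldlRangeGetD row "" pvEncCell acc)]
  rw [← List.foldl_flatten]

theorem pvEncodeFlat_testBit : ∀ (l : List String) (b e p q : Nat),
    ((l.foldl pvEncCell (b, e, p)).1.testBit q
      = (b.testBit q || (decide (p ≤ q) && decide (q < p + l.length) && (l.getD (q - p) "" == "#")))) ∧
    ((l.foldl pvEncCell (b, e, p)).2.1.testBit q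
      = (e.testBit q || (decide (p ≤ q) && decide (q < p + l.length) && (l.getD (q - p) "" == ".")))) := by
  intro l
  induction l with
  | nil => intro b e p q; simp [pvVal]
  | cons c l ih =>
    intro b e p q
    simp only [List.foldl_cons, List.length_cons]
    have harith : p + 1 + l.length = p + (l.length + 1) := by omega
    have hcell : pvEncCell (b, e, p) c
        = (if c == "#" then b ||| (1 <<< p) else b,
           if c == "." then e ||| (1 <<< p) else e, p + 1) := by
      by_cases h1 : c == "#" <;> by_cases h2 : c == "." <;> simp_all [pvEncCell]
    rw [hcell]
    obtain ⟨ih1, ih2⟩ := ih (if c == "#" then b ||| (1 <<< p) else b)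
      (if c == "." then e ||| (1 <<< p) else e) (p + 1) q
    have hbB : (if c == "#" then b ||| (1 <<< p) else b).testBit q
        = (b.testBit q || (decide (p = q) && (c == "#"))) := by
      by_cases h1 : c == "#"
      · rw [if_pos h1, Nat.testBit_lor, pvTestBit_one_shiftLeft]
        simp [h1]
      · rw [if_neg h1]
        simp [h1]
    have hbE : (if c == "." then e ||| (1 <<< p) else e).testBit q
        = (e.testBit q || (decide (p = q) && (c == "."))) := by
      by_cases h2 : c == "."
      · rw [if_pos h2, Nat.testBit_lor, pvTestBit_one_shiftLeft]
        simp [h2]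
      · rw [if_neg h2]
        simp [h2]
    rw [hbB] at ih1
    rw [hbE] at ih2
    rw [ih1, ih2]
    rcases Nat.lt_trichotomy q p with hq | rfl | hq
    · simp [show ¬ p ≤ q from by omega, show ¬ p + 1 ≤ q from by omega,
        show p ≠ q from by omega]
    · simp [show ¬ q + 1 ≤ q from by omega, show q < q + (l.length + 1) from by omega,
        Nat.sub_self]
    · simp [harith, show q - p = (q - (p + 1)) + 1 from by omega, show p ≤ q from by omega,
        show p + 1 ≤ q from by omega, show p ≠ q from by omega]
      exact ⟨rfl, rfl⟩

theorem pvEncode_fst (s : List (List String))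
    (hr : ∀ r ∈ s, r.length = s.length) : (pvEncode s).1 = pvVal "#" s.flatten := by
  rw [pvEncode_eq_flat s hr]
  apply Nat.eq_of_testBit_eq
  intro q
  rw [(pvEncodeFlat_testBit s.flatten 0 0 0 q).1, pvVal_testBit]
  simp

theorem pvEncode_snd (s : List (List String))
    (hr : ∀ r ∈ s, r.length = s.length) : (pvEncode s).2.1 = pvVal "." s.flatten := by
  rw [pvEncode_eq_flat s hr]
  apply Nat.eq_of_testBit_eq
  intro q
  rw [(pvEncodeFlat_testBit s.flatten 0 0 0 q).2, pvVal_testBit]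
  simp

theorem pvLenFlatten {α : Type} : ∀ (s : List (List α)) (n : Nat),
    (∀ r ∈ s, r.length = n) → s.flatten.length = n * s.length := by
  intro s
  induction s with
  | nil => intro n _; simp
  | cons r t ih =>
    intro n h
    have hr : r.length = n := h r (by simp)
    have ht := ih n (fun x hx => h x (by simp [hx]))
    simp only [List.flatten_cons, List.length_append, List.length_cons, hr, ht]
    ring

theorem pvFlattenGet {α : Type} : ∀ (s : List (List α)) (n y x : Nat),
    (∀ r ∈ s, r.length = n) → x < n →
    s.flatten[y * n + x]? = s[y]?.bind (fun r => r[x]?) := by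
  intro s
  induction s with
  | nil => intro n y x _ _; simp
  | cons r t ih =>
    intro n y x h hx
    have hr : r.length = n := h r (by simp)
    have ht : ∀ r' ∈ t, r'.length = n := fun x hx => h x (by simp [hx])
    cases y with
    | zero =>
      have hx' : x < r.length := by omega
      simp [List.getElem?_append_left hx']
    | succ y =>
      have harith : (y + 1) * n + x = r.length + (y * n + x) := by rw [hr]; ring
      rw [List.flatten_cons, harith, List.getElem?_append_right (by omega)]
      simp [ih n y x ht hx]

-- named form of the rating's cell update (definitionally the inner lambda in pvBioRating)
def pvRatCell (acc : Int × Int) (c : String) : Int × Int :=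
  (if c == "#" then acc.1 + acc.2 else acc.1, acc.2 * 2)

theorem pvRatVal : ∀ (l : List String) (r t : Int),
    (l.foldl pvRatCell (r, t)).1 = r + t * (pvVal "#" l : Int) := by
  intro l
  induction l with
  | nil => intro r t; simp [pvVal]
  | cons c l ih =>
    intro r t
    by_cases hc : c = "#" <;>
      (simp [pvRatCell, hc, ih, pvVal]; push_cast; ring)

theorem pvRating_eq (s : List (List String)) (n : Nat) (hn : s.length = n) (hne : s ≠ [])
    (hr : ∀ r ∈ s, r.length = n) : pvBioRating s = (pvVal "#" s.flatten : Int) := by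
  have hhd : (s.headD []).length = s.length := by
    obtain ⟨r0, t, rfl⟩ := List.exists_cons_of_ne_nil hne
    have := hr r0 (by simp)
    simpa [hn] using this
  unfold pvBioRating
  rw [hhd]
  rw [show (fun (acc : Int × Int) (y : Nat) =>
      (List.range s.length).foldl (fun acc x =>
        ((if (s.getD y []).getD x "" == "#" then acc.1 + acc.2 else acc.1), acc.2 * 2)) acc)
    = (fun (acc : Int × Int) (y : Nat) =>
      (List.range s.length).foldl (fun acc x => pvRatCell acc ((s.getD y []).getD x "")) acc)
    from rfl]
  rw [pvFoldlRangeGetD s ([] : List String)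
    (fun (acc : Int × Int) row =>
      (List.range s.length).foldl (fun acc x => pvRatCell acc (row.getD x "")) acc)
    ((0 : Int), (1 : Int))]
  rw [PySem.List.foldl_congr_mem s _
    (fun (acc : Int × Int) row => row.foldl pvRatCell acc) _
    (fun acc row hrow => by
      rw [show s.length = row.length from by rw [hr row hrow, hn]]
      exact pvFoldlRangeGetD row "" pvRatCell acc)]
  rw [← List.foldl_flatten]
  rw [pvRatVal]
  simp

-- per-position condition of Source B's update, for the bit lemma about pvStep
def pvCondB (n bugs empt p : Nat) : Bool :=
  if bugs.testBit p then decide (pvAdj n bugs p = 1)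
  else if empt.testBit p then decide (pvAdj n bugs p = 1 ∨ pvAdj n bugs p = 2)
  else false

def pvCondE (n bugs empt p : Nat) : Bool :=
  if bugs.testBit p then decide (¬ pvAdj n bugs p = 1)
  else if empt.testBit p then decide (¬ (pvAdj n bugs p = 1 ∨ pvAdj n bugs p = 2))
  else false

-- named form of pvStep's per-position update (definitionally the lambda in pvStep)
def pvStepCell (n bugs empt : Nat) (acc : Nat × Nat) (p : Nat) : Nat × Nat :=
  if bugs.testBit p then
    (if pvAdj n bugs p = 1 then (acc.1 ||| (1 <<< p), acc.2)
     else (acc.1, acc.2 ||| (1 <<< p)))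
  else if empt.testBit p then
    (if pvAdj n bugs p = 1 ∨ pvAdj n bugs p = 2 then (acc.1 ||| (1 <<< p), acc.2)
     else (acc.1, acc.2 ||| (1 <<< p)))
  else acc

theorem pvStepCell_testBit (n b e : Nat) (F : Nat × Nat) (m q : Nat) :
    ((pvStepCell n b e F m).1.testBit q
        = (F.1.testBit q || (decide (m = q) && pvCondB n b e m)))
    ∧ ((pvStepCell n b e F m).2.testBit q
        = (F.2.testBit q || (decide (m = q) && pvCondE n b e m))) := by
  have hor : ∀ (G : Nat), (G ||| 1 <<< m).testBit q = (G.testBit q || decide (m = q)) := by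
    intro G; rw [Nat.testBit_lor, pvTestBit_one_shiftLeft]
  by_cases h1 : b.testBit m
  · by_cases h3 : pvAdj n b m = 1
    · rw [show pvStepCell n b e F m = (F.1 ||| 1 <<< m, F.2) from by simp [pvStepCell, h1, h3]]
      rw [show pvCondB n b e m = true from by simp [pvCondB, h1, h3]]
      rw [show pvCondE n b e m = false from by simp [pvCondE, h1, h3]]
      exact ⟨by rw [show ((F.1 ||| 1 <<< m, F.2) : Nat × Nat).1 = F.1 ||| 1 <<< m from rfl, hor]; simp, by simp⟩
    · rw [show pvStepCell n b e F m = (F.1, F.2 ||| 1 <<< m) from by simp [pvStepCell, h1, h3]]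
      rw [show pvCondB n b e m = false from by simp [pvCondB, h1, h3]]
      rw [show pvCondE n b e m = true from by simp [pvCondE, h1, h3]]
      exact ⟨by simp, by rw [show ((F.1, F.2 ||| 1 <<< m) : Nat × Nat).2 = F.2 ||| 1 <<< m from rfl, hor]; simp⟩
  · by_cases h2 : e.testBit m
    · by_cases h34 : pvAdj n b m = 1 ∨ pvAdj n b m = 2
      · rw [show pvStepCell n b e F m = (F.1 ||| 1 <<< m, F.2) from by simp [pvStepCell, h1, h2, h34]]
        rw [show pvCondB n b e m = true from by simp [pvCondB, h1, h2, h34]]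
        rw [show pvCondE n b e m = false from by simp [pvCondE, h1, h2, h34]]
        exact ⟨by rw [show ((F.1 ||| 1 <<< m, F.2) : Nat × Nat).1 = F.1 ||| 1 <<< m from rfl, hor]; simp, by simp⟩
      · rw [show pvStepCell n b e F m = (F.1, F.2 ||| 1 <<< m) from by simp [pvStepCell, h1, h2, h34]]
        rw [show pvCondB n b e m = false from by simp [pvCondB, h1, h2, h34]]
        rw [show pvCondE n b e m = true from by simp [pvCondE, h1, h2, h34]]
        exact ⟨by simp, by rw [show ((F.1, F.2 ||| 1 <<< m) : Nat × Nat).2 = F.2 ||| 1 <<< m from rfl, hor]; simp⟩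
    · rw [show pvStepCell n b e F m = F from by simp [pvStepCell, h1, h2]]
      rw [show pvCondB n b e m = false from by simp [pvCondB, h1, h2]]
      rw [show pvCondE n b e m = false from by simp [pvCondE, h1, h2]]
      exact ⟨by simp, by simp⟩

theorem pvStepAux_testBit (n b e : Nat) : ∀ (m : Nat) (acc : Nat × Nat) (q : Nat),
    (((List.range m).foldl (pvStepCell n b e) acc).1.testBit q
        = (acc.1.testBit q || (decide (q < m) && pvCondB n b e q))) ∧
    (((List.range m).foldl (pvStepCell n b e) acc).2.testBit q
        = (acc.2.testBit q || (decide (q < m) && pvCondE n b e q))) := by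
  intro m
  induction m with
  | zero => intro acc q; simp
  | succ m ih =>
    intro acc q
    rw [List.range_succ, List.foldl_append]
    obtain ⟨ih1, ih2⟩ := ih acc q
    simp only [List.foldl_cons, List.foldl_nil]
    obtain ⟨hc1, hc2⟩ :=
      pvStepCell_testBit n b e ((List.range m).foldl (pvStepCell n b e) acc) m q
    rw [hc1, hc2, ih1, ih2]
    rcases Nat.lt_trichotomy q m with hq | rfl | hq
    · simp [show q < m + 1 from by omega, hq, show m ≠ q from by omega]
    · simp [show q < q + 1 from by omega, show ¬ q < q from by omega]
    · simp [show ¬ q < m + 1 from by omega, show ¬ q < m from by omega,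
        show m ≠ q from by omega]

theorem pvStep_testBit (n b e q : Nat) :
    ((pvStep n b e).1.testBit q = (decide (q < n * n) && pvCondB n b e q)) ∧
    ((pvStep n b e).2.testBit q = (decide (q < n * n) && pvCondE n b e q)) := by
  have h : pvStep n b e = (List.range (n * n)).foldl (pvStepCell n b e) (0, 0) := rfl
  rw [h]
  obtain ⟨h1, h2⟩ := pvStepAux_testBit n b e (n * n) (0, 0) q
  rw [h1, h2]
  simp

theorem pvNext_len (s : List (List String)) : (pvNextMinute s).length = s.length := by
  simp [pvNextMinute, PySem.List.length_enumerate]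

theorem pvNext_rows (s : List (List String)) (n : Nat) (hr : ∀ r ∈ s, r.length = n) :
    ∀ r ∈ pvNextMinute s, r.length = n := by
  intro r hrm
  simp only [pvNextMinute, List.mem_map] at hrm
  obtain ⟨yr, hyr, rfl⟩ := hrm
  rw [PySem.List.mem_enumerate_iff] at hyr
  obtain ⟨k, hk, rfl⟩ := hyr
  simpa [PySem.List.length_enumerate] using hr s[k] (List.getElem_mem hk)

theorem pvNext_get (s : List (List String)) (y x : Nat) (hy : y < s.length)
    (hx : x < (s.getD y []).length) :
    (pvNextMinute s)[y]?.bind (fun r => r[x]?) = some (pvNewPosition s (y : Int) (x : Int)) := by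
  have hyy : s[y]? = some (s.getD y []) := by
    rw [List.getD_eq_getElem s [] hy]
    exact List.getElem?_eq_getElem hy
  have hxx : (s.getD y [])[x]? = some ((s.getD y []).getD x "") := by
    rw [List.getD_eq_getElem _ "" hx]
    exact List.getElem?_eq_getElem hx
  rw [show pvNextMinute s
      = (PySem.List.enumerate s 0).map (fun yr =>
          (PySem.List.enumerate yr.2 0).map (fun xc => pvNewPosition s yr.1 xc.1)) from rfl]
  rw [List.getElem?_map, PySem.List.getElem?_enumerate, hyy]
  simp only [Option.map_some, Option.bind_some]
  rw [List.getElem?_map, PySem.List.getElem?_enumerate, hxx]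
  simp

-- the cell of s at flat position r*n+c, read through the masks
theorem pvBitCell (s : List (List String)) (n : Nat) (t : String) (hn : s.length = n)
    (hr : ∀ r ∈ s, r.length = n) (r c : Nat) (hrn : r < n) (hcn : c < n) :
    (pvVal t s.flatten).testBit (r * n + c) = ((s.getD r []).getD c "" == t) := by
  have hidx : r * n + c < s.flatten.length := by
    rw [pvLenFlatten s n hr, hn]
    calc r * n + c < r * n + n := by omega
    _ = (r + 1) * n := by ring
    _ ≤ n * n := Nat.mul_le_mul_right n (by omega)
  have hry : r < s.length := by omega
  have hflat : s.flatten[r * n + c]? = (s.getD r [])[c]? := by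
    rw [pvFlattenGet s n r c hr hcn, List.getD_eq_getElem s [] hry,
      List.getElem?_eq_getElem hry]
    rfl
  rw [pvVal_testBit, decide_eq_true hidx, Bool.true_and,
    List.getD_eq_getElem?_getD, hflat, ← List.getD_eq_getElem?_getD]

theorem pvCellA_in (s : List (List String)) (n : Nat) (hn : s.length = n)
    (hr : ∀ r ∈ s, r.length = n) (r c : Nat) (hrn : r < n) (hcn : c < n) :
    pvCellA s (r : Int) (c : Int) = some ((s.getD r []).getD c "") := by
  have hry : r < s.length := by omega
  have hcy : c < (s.getD r []).length := by rw [hr _ (by rw [List.getD_eq_getElem s [] hry]; exact List.getElem_mem hry)]; omega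
  unfold pvCellA
  rw [PySem.List.pyGet?_natCast, List.getD_eq_getElem s [] hry, List.getElem?_eq_getElem hry]
  simp only [Option.bind_some]
  rw [PySem.List.pyGet?_natCast, ← List.getD_eq_getElem s [] hry,
    List.getD_eq_getElem _ "" hcy, List.getElem?_eq_getElem hcy]

theorem pvPosn_in (s : List (List String)) (n : Nat) (hn : s.length = n)
    (hr : ∀ r ∈ s, r.length = n) (r c : Nat) (hrn : r < n) (hcn : c < n) :
    pvPosnValue s (r : Int) (c : Int)
      = (if (pvVal "#" s.flatten).testBit (r * n + c) then 1 else 0) := by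
  unfold pvPosnValue
  rw [if_neg (by omega)]
  rw [pvCellA_in s n hn hr r c hrn hcn]
  rw [pvBitCell s n "#" hn hr r c hrn hcn]

theorem pvPosn_row_out (s : List (List String)) (r c : Int) (hro : s.length ≤ r) :
    pvPosnValue s r c = 0 := by
  unfold pvPosnValue
  by_cases hneg : r < 0 ∨ c < 0
  · rw [if_pos hneg]
  · rw [if_neg hneg]
    have : PySem.List.pyGet? s r = none := by
      rw [PySem.List.pyGet?_eq_none_iff]
      unfold PySem.Raise.InRange
      omega
    simp [pvCellA, this]

theorem pvPosn_col_out (s : List (List String)) (n : Nat) (hn : s.length = n)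
    (hr : ∀ r' ∈ s, r'.length = n) (r c : Nat) (hrn : r < n) (hcn : n ≤ c) :
    pvPosnValue s (r : Int) (c : Int) = 0 := by
  have hry : r < s.length := by omega
  have hlen : (s.getD r []).length = n :=
    hr _ (by rw [List.getD_eq_getElem s [] hry]; exact List.getElem_mem hry)
  unfold pvPosnValue
  rw [if_neg (by omega)]
  have h1 : s[r]? = some (s.getD r []) := by
    rw [List.getD_eq_getElem s [] hry]
    exact List.getElem?_eq_getElem hry
  have h2 : (s.getD r [])[c]? = none := List.getElem?_eq_none (by omega)
  have hc : pvCellA s (r : Int) (c : Int) = none := by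
    unfold pvCellA
    rw [PySem.List.pyGet?_natCast, h1]
    simp only [Option.bind_some]
    rw [PySem.List.pyGet?_natCast, h2]
  rw [hc]

theorem pvPosn_neg_row (s : List (List String)) (c : Int) :
    pvPosnValue s (-1) c = 0 := by
  unfold pvPosnValue
  rw [if_pos (by omega)]

theorem pvPosn_neg_col (s : List (List String)) (r : Int) :
    pvPosnValue s r (-1) = 0 := by
  unfold pvPosnValue
  rw [if_pos (by omega)]

theorem pvAdj_eq (s : List (List String)) (n : Nat) (hn : s.length = n)
    (hr : ∀ r ∈ s, r.length = n) (y x : Nat) (hy : y < n) (hx : x < n) :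
    pvCountAdj s (y : Int) (x : Int) = (pvAdj n (pvVal "#" s.flatten) (y * n + x) : Int) := by
  have hn0 : 0 < n := by omega
  have hpmod : (y * n + x) % n = x := by
    rw [Nat.mul_comm y n, Nat.mul_add_mod, Nat.mod_eq_of_lt hx]
  have hlt : ∀ r : Nat, r < n → ∀ c : Nat, c < n → r * n + c < n * n := by
    intro r hrn c hcn
    calc r * n + c < r * n + n := by omega
    _ = (r + 1) * n := by ring
    _ ≤ n * n := Nat.mul_le_mul_right n (by omega)
  have hA1 : pvPosnValue s ((y : Int) + 1) (x : Int)
      = ((if y * n + x + n < n * n ∧ (pvVal "#" s.flatten).testBit (y * n + x + n) then 1 else 0 : Nat) : Int) := by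
    rw [show (y : Int) + 1 = ((y + 1 : Nat) : Int) from by push_cast; ring]
    have he : (y + 1) * n + x = y * n + x + n := by ring
    by_cases hy1 : y + 1 < n
    · rw [pvPosn_in s n hn hr (y + 1) x hy1 hx, he]
      have hcond : y * n + x + n < n * n := by rw [← he]; exact hlt (y + 1) hy1 x hx
      by_cases hb : (pvVal "#" s.flatten).testBit (y * n + x + n)
      · rw [if_pos hb, if_pos ⟨hcond, hb⟩]; simp
      · rw [if_neg hb, if_neg (fun hc => hb hc.2)]; simp
    · rw [pvPosn_row_out s _ _ (by push_cast; omega)]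
      have hcond : ¬ (y * n + x + n < n * n) := by
        have h2 : n * n ≤ (y + 1) * n := Nat.mul_le_mul_right n (by omega)
        omega
      rw [if_neg (fun hc => hcond hc.1)]
      simp
  have hA2 : pvPosnValue s (y : Int) ((x : Int) + 1)
      = ((if x < n - 1 ∧ (pvVal "#" s.flatten).testBit (y * n + x + 1) then 1 else 0 : Nat) : Int) := by
    rw [show (x : Int) + 1 = ((x + 1 : Nat) : Int) from by push_cast; ring]
    by_cases hx1 : x + 1 < n
    · rw [pvPosn_in s n hn hr y (x + 1) hy hx1,
        show y * n + (x + 1) = y * n + x + 1 from by ring]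
      have hcond : x < n - 1 := by omega
      by_cases hb : (pvVal "#" s.flatten).testBit (y * n + x + 1)
      · rw [if_pos hb, if_pos ⟨hcond, hb⟩]; simp
      · rw [if_neg hb, if_neg (fun hc => hb hc.2)]; simp
    · rw [pvPosn_col_out s n hn hr y (x + 1) hy (by omega)]
      rw [if_neg (fun hc => absurd hc.1 (by omega))]
      simp
  have hA3 : pvPosnValue s ((y : Int) + (-1)) (x : Int)
      = ((if n ≤ y * n + x ∧ (pvVal "#" s.flatten).testBit (y * n + x - n) then 1 else 0 : Nat) : Int) := by
    cases y with
    | zero =>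
      rw [show ((0 : Nat) : Int) + (-1) = (-1 : Int) from by norm_num, pvPosn_neg_row]
      rw [if_neg (fun hc => absurd hc.1 (by omega))]
      simp
    | succ z =>
      rw [show ((z + 1 : Nat) : Int) + (-1) = ((z : Nat) : Int) from by push_cast; ring]
      rw [pvPosn_in s n hn hr z x (by omega) hx]
      have he : (z + 1) * n + x - n = z * n + x := by
        have h2 : (z + 1) * n = z * n + n := by ring
        omega
      have hcond : n ≤ (z + 1) * n + x := by
        have h2 : (z + 1) * n = z * n + n := by ring
        omega
      rw [he]
      by_cases hb : (pvVal "#" s.flatten).testBit (z * n + x)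
      · rw [if_pos hb, if_pos ⟨hcond, hb⟩]; simp
      · rw [if_neg hb, if_neg (fun hc => hb hc.2)]; simp
  have hA4 : pvPosnValue s (y : Int) ((x : Int) + (-1))
      = ((if 0 < x ∧ (pvVal "#" s.flatten).testBit (y * n + x - 1) then 1 else 0 : Nat) : Int) := by
    cases x with
    | zero =>
      rw [show ((0 : Nat) : Int) + (-1) = (-1 : Int) from by norm_num, pvPosn_neg_col]
      rw [if_neg (fun hc => absurd hc.1 (by omega))]
      simp
    | succ z =>
      rw [show ((z + 1 : Nat) : Int) + (-1) = ((z : Nat) : Int) from by push_cast; ring]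
      rw [pvPosn_in s n hn hr y z hy (by omega),
        show y * n + (z + 1) - 1 = y * n + z from by omega]
      have hcond : 0 < z + 1 := by omega
      by_cases hb : (pvVal "#" s.flatten).testBit (y * n + z)
      · rw [if_pos hb, if_pos ⟨hcond, hb⟩]; simp
      · rw [if_neg hb, if_neg (fun hc => hb hc.2)]; simp
  unfold pvCountAdj pvAdj
  rw [hpmod, hA1, hA2, hA3, hA4]
  push_cast
  ring

theorem pvNewPos_eq (s : List (List String)) (n : Nat) (hn : s.length = n)
    (hr : ∀ r ∈ s, r.length = n) (y x : Nat) (hy : y < n) (hx : x < n) :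
    ((pvNewPosition s (y : Int) (x : Int) == "#")
        = pvCondB n (pvVal "#" s.flatten) (pvVal "." s.flatten) (y * n + x)) ∧
    ((pvNewPosition s (y : Int) (x : Int) == ".")
        = pvCondE n (pvVal "#" s.flatten) (pvVal "." s.flatten) (y * n + x)) := by
  have hbit := pvBitCell s n "#" hn hr y x hy hx
  have hebit := pvBitCell s n "." hn hr y x hy hx
  have ha := pvAdj_eq s n hn hr y x hy hx
  have hcell : (pvCellA s (y : Int) (x : Int)).getD "" = (s.getD y []).getD x "" := by
    rw [pvCellA_in s n hn hr y x hy hx]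
    rfl
  unfold pvNewPosition pvCondB pvCondE
  rw [hcell, ha, hbit, hebit]
  have hcast1 : ((pvAdj n (pvVal "#" s.flatten) (y * n + x) : Nat) : Int) = 1
      ↔ pvAdj n (pvVal "#" s.flatten) (y * n + x) = 1 := by omega
  have hcast2 : ((pvAdj n (pvVal "#" s.flatten) (y * n + x) : Nat) : Int) = 2
      ↔ pvAdj n (pvVal "#" s.flatten) (y * n + x) = 2 := by omega
  by_cases hc1 : (s.getD y []).getD x "" == "#" <;>
    by_cases hc2 : (s.getD y []).getD x "" == "." <;>
      by_cases h1 : pvAdj n (pvVal "#" s.flatten) (y * n + x) = 1 <;>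
        by_cases h2 : pvAdj n (pvVal "#" s.flatten) (y * n + x) = 2 <;>
          simp_all [hcast1, hcast2]

theorem pvVal_next (s : List (List String)) (n : Nat) (hn : s.length = n) (hne : s ≠ [])
    (hr : ∀ r ∈ s, r.length = n) :
    pvVal "#" (pvNextMinute s).flatten = (pvStep n (pvVal "#" s.flatten) (pvVal "." s.flatten)).1 ∧
    pvVal "." (pvNextMinute s).flatten = (pvStep n (pvVal "#" s.flatten) (pvVal "." s.flatten)).2 := by
  have hn0 : 0 < n := by rw [← hn]; exact List.length_pos_of_ne_nil hne
  have hrows := pvNext_rows s n hr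
  have hlen2 : (pvNextMinute s).flatten.length = n * n := by
    rw [pvLenFlatten _ n hrows, pvNext_len, hn]
  have hcell : ∀ q, q < n * n →
      (pvNextMinute s).flatten.getD q ""
        = pvNewPosition s ((q / n : Nat) : Int) ((q % n : Nat) : Int) := by
    intro q hq
    have hy : q / n < n := (Nat.div_lt_iff_lt_mul hn0).mpr hq
    have hx : q % n < n := Nat.mod_lt _ hn0
    have hys : q / n < s.length := by omega
    have hrowlen : (s.getD (q / n) []).length = n :=
      hr _ (by rw [List.getD_eq_getElem s [] hys]; exact List.getElem_mem hys)
    have hqd : q / n * n + q % n = q := by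
      rw [Nat.mul_comm]; exact Nat.div_add_mod q n
    rw [List.getD_eq_getElem?_getD]
    conv_lhs => rw [← hqd]
    rw [pvFlattenGet _ n _ _ hrows hx, pvNext_get s (q / n) (q % n) hys (by omega)]
    rfl
  constructor
  · apply Nat.eq_of_testBit_eq
    intro q
    rw [pvVal_testBit, (pvStep_testBit n _ _ q).1, hlen2]
    by_cases hq : q < n * n
    · have hy : q / n < n := (Nat.div_lt_iff_lt_mul hn0).mpr hq
      have hx : q % n < n := Nat.mod_lt _ hn0
      have hqd : q / n * n + q % n = q := by rw [Nat.mul_comm]; exact Nat.div_add_mod q n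
      rw [hcell q hq, decide_eq_true hq]
      have hnp := (pvNewPos_eq s n hn hr (q / n) (q % n) hy hx).1
      rw [hqd] at hnp
      rw [hnp]
    · rw [decide_eq_false hq]
      simp
  · apply Nat.eq_of_testBit_eq
    intro q
    rw [pvVal_testBit, (pvStep_testBit n _ _ q).2, hlen2]
    by_cases hq : q < n * n
    · have hy : q / n < n := (Nat.div_lt_iff_lt_mul hn0).mpr hq
      have hx : q % n < n := Nat.mod_lt _ hn0
      have hqd : q / n * n + q % n = q := by rw [Nat.mul_comm]; exact Nat.div_add_mod q n
      rw [hcell q hq, decide_eq_true hq]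
      have hnp := (pvNewPos_eq s n hn hr (q / n) (q % n) hy hx).2
      rw [hqd] at hnp
      rw [hnp]
    · rw [decide_eq_false hq]
      simp

theorem pvLoop_eq (n : Nat) : ∀ (fuel : Nat) (s : List (List String)) (seen : PySem.Set Int),
    s.length = n → s ≠ [] → (∀ r ∈ s, r.length = n) →
    pvLoopA fuel s seen = pvLoopB n fuel (pvVal "#" s.flatten) (pvVal "." s.flatten) seen := by
  intro fuel
  induction fuel with
  | zero => intro s seen _ _ _; rfl
  | succ f ih =>
    intro s seen hn hne hr
    have hval := pvVal_next s n hn hne hr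
    have hlen' : (pvNextMinute s).length = n := by rw [pvNext_len, hn]
    have hne' : pvNextMinute s ≠ [] := by
      have h0 : 0 < (pvNextMinute s).length := by
        rw [hlen', ← hn]
        exact List.length_pos_of_ne_nil hne
      exact List.ne_nil_of_length_pos h0
    have hrows' := pvNext_rows s n hr
    have hrat : pvBioRating (pvNextMinute s)
        = ((pvStep n (pvVal "#" s.flatten) (pvVal "." s.flatten)).1 : Int) := by
      rw [pvRating_eq _ n hlen' hne' hrows', hval.1]
    simp only [pvLoopA, pvLoopB]
    rw [hrat]
    by_cases hmem : PySem.Set.contains seen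
        ((pvStep n (pvVal "#" s.flatten) (pvVal "." s.flatten)).1 : Int)
    · rw [if_pos hmem, if_pos hmem]
    · rw [if_neg hmem, if_neg hmem,
        ih (pvNextMinute s) _ hlen' hne' hrows', hval.1, hval.2]

-- ===== VERDICT (by name: the statement is the Claim_ definition above) =====
theorem get_first_repeat_spec : Claim_equal_get_first_repeat := by
  intro s _ hpre
  obtain ⟨hne, hr⟩ := hpre
  unfold Spec_get_first_repeat get_first_repeat
  have halt : get_first_repeat_alt s = pvLoopB s.length (2 ^ (s.length * s.length) + 1)
      (pvEncode s).1 (pvEncode s).2.1 (PySem.Set.ofList [((pvEncode s).1 : Int)]) := rfl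
  rw [halt, pvEncode_fst s hr, pvEncode_snd s hr, pvRating_eq s s.length rfl hne hr]
  exact pvLoop_eq s.length _ s _ rfl hne hr
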